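-- pv_equiv track=rewrite | github.com/blzzua/codewars | 6-kyu/poker_suit_isomorphisms.py | boards_isomorphic
-- ===== SOURCE A (Python) =====
-- from itertools import permutations
--
-- def tokenize(suit_map, s):
--     return sorted([('23456789TJQKA'.index(rank) , suit_map.index(suit)) for rank, suit  in zip(s[::2],s[1::2])])
--
-- def boards_isomorphic(s1, s2):
--     suit_map_init = ('d', 'h', 'c', 's')
--     variation1 = tokenize(suit_map_init, s1)
--     for suit_map in permutations(suit_map_init):
--         variation2  = tokenize(suit_map, s2)
--         if variation2 == variation1:
--             return True
--     return False
-- ===== SOURCE B (Python) =====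
-- def _canon(s):
--     groups = [[], [], [], []]
--     for rank, suit in zip(s[::2], s[1::2]):
--         groups['dhcs'.index(suit)].append('23456789TJQKA'.index(rank))
--     return sorted(sorted(g) for g in groups)
--
-- def boards_isomorphic(s1, s2):
--     return _canon(s1) == _canon(s2)
-- ===== Notes on version B (the rewrite author's own statement) =====
-- stated objective: simpler
-- what changed: A searches all 24 suit permutations for one that makes the sorted token lists equal; B instead computes a single canonical form per board (the sorted list of per-suit sorted rank index multisets) and compares the two canonical forms.
import Mathlib
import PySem

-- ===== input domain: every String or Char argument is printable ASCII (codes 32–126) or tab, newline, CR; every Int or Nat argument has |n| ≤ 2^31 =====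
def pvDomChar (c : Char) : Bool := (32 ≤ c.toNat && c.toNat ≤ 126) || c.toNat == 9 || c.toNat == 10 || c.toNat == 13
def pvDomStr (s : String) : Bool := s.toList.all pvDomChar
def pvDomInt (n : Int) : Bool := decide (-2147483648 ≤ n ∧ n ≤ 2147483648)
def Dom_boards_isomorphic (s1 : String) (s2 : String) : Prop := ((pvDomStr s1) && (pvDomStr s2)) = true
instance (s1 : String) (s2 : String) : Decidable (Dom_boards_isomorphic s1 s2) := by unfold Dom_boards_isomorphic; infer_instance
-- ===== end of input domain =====

-- B replaces A's 24-suit-permutation search by comparing one canonical form per board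
-- (the sorted list of per-suit sorted rank-multisets); objective: simpler.

-- ===== PORT A =====
-- zip(s[::2], s[1::2]) — the card list; both Pythons compute exactly this expression
def pvPairs (s : String) : List (Char × Char) :=
  (((PySem.Str.slice? s none none 2).getD "").toList).zip
    (((PySem.Str.slice? s (some 1) none 2).getD "").toList)

-- '<seq>'.index(c) for a single character c, as both Pythons use it; exact where it
-- succeeds (Pre_ excludes the ValueError inputs, where .getD 0 is dead code)
def pvIdx (cs : List Char) (c : Char) : Nat := (PySem.List.index? cs c).getD 0

def pvRanks : List Char := "23456789TJQKA".toList

def tokenize (suit_map : List Char) (s : String) : List (Nat × Nat) :=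
  PySem.List.sorted2
    ((pvPairs s).map (fun rs => (pvIdx pvRanks rs.1, pvIdx suit_map rs.2)))
    Prod.fst Prod.snd

def boards_isomorphic (s1 : String) (s2 : String) : Bool :=
  let suit_map_init : List Char := ['d', 'h', 'c', 's']
  let variation1 := tokenize suit_map_init s1
  (PySem.List.permutations suit_map_init 4).any
    (fun suit_map => tokenize suit_map s2 == variation1)

-- ===== PORT B =====
def pvCanon (s : String) : List (List Nat) :=
  let groups := (pvPairs s).foldl
    (fun (g : List (List Nat)) rs =>
      let i := pvIdx ['d', 'h', 'c', 's'] rs.2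
      g.set i ((g.getD i []) ++ [pvIdx pvRanks rs.1]))
    [[], [], [], []]
  PySem.List.sorted (groups.map (fun gr => PySem.List.sorted gr (fun x => x))) (fun x => x)

def boards_isomorphic_alt (s1 : String) (s2 : String) : Bool :=
  pvCanon s1 == pvCanon s2

-- ===== PRECONDITION & SPEC =====
-- Pre_ excludes exactly the inputs where the Python A raises ValueError: some card has a
-- rank outside '23456789TJQKA' or a suit outside 'dhcs' (B raises ValueError there too).
def ValidBoard (s : String) : Prop :=
  ∀ p ∈ pvPairs s, p.1 ∈ pvRanks ∧ p.2 ∈ (['d', 'h', 'c', 's'] : List Char)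

def Pre_boards_isomorphic (s1 : String) (s2 : String) : Prop :=
  ValidBoard s1 ∧ ValidBoard s2

instance (s1 : String) (s2 : String) : Decidable (Pre_boards_isomorphic s1 s2) := by
  unfold Pre_boards_isomorphic ValidBoard; infer_instance

def pvWitness_boards_isomorphic : String × String := ("2d3h", "2c3s")

def Spec_boards_isomorphic (s1 : String) (s2 : String) (out : Bool) : Prop :=
  out = boards_isomorphic_alt s1 s2
instance (s1 : String) (s2 : String) (out : Bool) : Decidable (Spec_boards_isomorphic s1 s2 out) := by
  unfold Spec_boards_isomorphic; infer_instance

-- ===== CLAIM (what is proved, stated in full; the proofs are below) =====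
def Claim_equal_boards_isomorphic : Prop :=
  ∀ (s1 : String) (s2 : String), Dom_boards_isomorphic s1 s2 →
    Pre_boards_isomorphic s1 s2 →
    Spec_boards_isomorphic s1 s2 (boards_isomorphic s1 s2)

-- ===== LEMMAS AND PROOFS =====

-- abbreviations for the proof
def pvDhcs : List Char := ['d', 'h', 'c', 's']
def rkF (c : Char) : Nat := pvIdx pvRanks c
def stF (c : Char) : Nat := pvIdx pvDhcs c
def rawT (s : String) : List (Nat × Nat) := (pvPairs s).map (fun p => (rkF p.1, stF p.2))
def selG (i : Nat) (t : List (Nat × Nat)) : List Nat :=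
  (t.filter (fun x => x.2 == i)).map Prod.fst
def sortN (l : List Nat) : List Nat := PySem.List.sorted l (fun x => x)
def canonList (t : List (Nat × Nat)) : List (List Nat) :=
  [sortN (selG 0 t), sortN (selG 1 t), sortN (selG 2 t), sortN (selG 3 t)]
def relab (σ : Nat → Nat) (t : List (Nat × Nat)) : List (Nat × Nat) :=
  t.map (fun x => (x.1, σ x.2))
def sigmaOf (m : List Char) (j : Nat) : Nat := pvIdx m (pvDhcs.getD j 'd')

-- sorted2 on pairs is sorting by the lexicographic key
lemma sorted2_eq_sorted_lex (xs : List (Nat × Nat)) :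
    PySem.List.sorted2 xs Prod.fst Prod.snd =
      PySem.List.sorted xs (fun p => (toLex p : Lex (Nat × Nat))) := by
  simp only [PySem.List.sorted2, PySem.List.sorted]
  congr 1
  funext acc x
  congr 1
  funext a b
  by_cases h1 : a.1 < b.1 <;> by_cases h2 : b.1 < a.1 <;> by_cases h3 : a.2 < b.2 <;>
    simp [h1, h2, h3, Prod.Lex.lt_iff] <;> omega

lemma sorted2_eq_iff_perm (xs ys : List (Nat × Nat)) :
    PySem.List.sorted2 xs Prod.fst Prod.snd = PySem.List.sorted2 ys Prod.fst Prod.snd ↔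
      xs.Perm ys := by
  constructor
  · intro h
    exact ((PySem.List.sorted2_perm xs _ _ _).symm.trans (h ▸ PySem.List.sorted2_perm ys _ _ _))
  · intro h
    rw [sorted2_eq_sorted_lex, sorted2_eq_sorted_lex]
    exact PySem.List.sorted_eq_sorted_of_perm _ _ _ (fun a b hab => toLex.injective hab) h

-- extraction of a matching from a permutation of explicit short lists
lemma perm2_exists {α : Type} (x0 x1 : α) (y : Nat → α)
    (h : ([x0, x1] : List α).Perm [y 0, y 1]) :
    ∃ σ : Nat → Nat, ([σ 0, σ 1] : List Nat).Perm [0, 1] ∧ x0 = y (σ 0) ∧ x1 = y (σ 1) := by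
  have hx : x0 ∈ [y 0, y 1] := h.subset (by simp)
  simp only [List.mem_cons, List.not_mem_nil, or_false] at hx
  rcases hx with h0 | h0
  · rw [h0] at h
    have h1 := h.cons_inv
    rw [List.perm_singleton] at h1
    exact ⟨fun n => n, by decide, h0, by simpa using h1⟩
  · rw [h0] at h
    have h1 := (h.trans (List.Perm.swap (y 1) (y 0) [])).cons_inv
    rw [List.perm_singleton] at h1
    exact ⟨fun n => 1 - n, by decide, h0, by simpa using h1⟩

lemma perm3_exists {α : Type} (x0 x1 x2 : α) (y : Nat → α)
    (h : ([x0, x1, x2] : List α).Perm [y 0, y 1, y 2]) :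
    ∃ σ : Nat → Nat, ([σ 0, σ 1, σ 2] : List Nat).Perm [0, 1, 2] ∧
      x0 = y (σ 0) ∧ x1 = y (σ 1) ∧ x2 = y (σ 2) := by
  have hx : x0 ∈ [y 0, y 1, y 2] := h.subset (by simp)
  simp only [List.mem_cons, List.not_mem_nil, or_false] at hx
  rcases hx with h0 | h0 | h0
  · rw [h0] at h
    obtain ⟨τ, hτ, e1, e2⟩ := perm2_exists x1 x2 (fun n => y (n + 1)) (by simpa using h.cons_inv)
    refine ⟨fun n => if n = 0 then 0 else τ (n - 1) + 1, ?_, h0, e1, e2⟩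
    have := hτ.map (fun n => n + 1)
    simp only [List.map_cons, List.map_nil] at this
    refine (this.cons 0).trans (by decide)
  · rw [h0] at h
    have h' := (h.trans (List.Perm.swap (y 1) (y 0) [y 2])).cons_inv
    obtain ⟨τ, hτ, e1, e2⟩ := perm2_exists x1 x2 (fun n => y ([0, 2].getD n 0)) (by simpa using h')
    refine ⟨fun n => if n = 0 then 1 else [0, 2].getD (τ (n - 1)) 0, ?_, h0, e1, e2⟩
    have := hτ.map (fun n => ([0, 2] : List Nat).getD n 0)
    simp only [List.map_cons, List.map_nil] at this
    refine (this.cons 1).trans (by decide)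
  · rw [h0] at h
    have p2 : ([y 0, y 1, y 2] : List α).Perm [y 2, y 0, y 1] :=
      ((List.Perm.swap (y 2) (y 1) []).cons (y 0)).trans (List.Perm.swap (y 2) (y 0) [y 1])
    have h' := (h.trans p2).cons_inv
    obtain ⟨τ, hτ, e1, e2⟩ := perm2_exists x1 x2 (fun n => y ([0, 1].getD n 0)) (by simpa using h')
    refine ⟨fun n => if n = 0 then 2 else [0, 1].getD (τ (n - 1)) 0, ?_, h0, e1, e2⟩
    have := hτ.map (fun n => ([0, 1] : List Nat).getD n 0)
    simp only [List.map_cons, List.map_nil] at this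
    refine (this.cons 2).trans (by decide)

lemma perm4_exists {α : Type} (x0 x1 x2 x3 : α) (y : Nat → α)
    (h : ([x0, x1, x2, x3] : List α).Perm [y 0, y 1, y 2, y 3]) :
    ∃ σ : Nat → Nat, ([σ 0, σ 1, σ 2, σ 3] : List Nat).Perm [0, 1, 2, 3] ∧
      x0 = y (σ 0) ∧ x1 = y (σ 1) ∧ x2 = y (σ 2) ∧ x3 = y (σ 3) := by
  have hx : x0 ∈ [y 0, y 1, y 2, y 3] := h.subset (by simp)
  simp only [List.mem_cons, List.not_mem_nil, or_false] at hx
  rcases hx with h0 | h0 | h0 | h0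
  · rw [h0] at h
    obtain ⟨τ, hτ, e1, e2, e3⟩ := perm3_exists x1 x2 x3 (fun n => y (n + 1)) (by simpa using h.cons_inv)
    refine ⟨fun n => if n = 0 then 0 else τ (n - 1) + 1, ?_, h0, e1, e2, e3⟩
    have := hτ.map (fun n => n + 1)
    simp only [List.map_cons, List.map_nil] at this
    refine (this.cons 0).trans (by decide)
  · rw [h0] at h
    have h' := (h.trans (List.Perm.swap (y 1) (y 0) [y 2, y 3])).cons_inv
    obtain ⟨τ, hτ, e1, e2, e3⟩ := perm3_exists x1 x2 x3 (fun n => y ([0, 2, 3].getD n 0)) (by simpa using h')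
    refine ⟨fun n => if n = 0 then 1 else [0, 2, 3].getD (τ (n - 1)) 0, ?_, h0, e1, e2, e3⟩
    have := hτ.map (fun n => ([0, 2, 3] : List Nat).getD n 0)
    simp only [List.map_cons, List.map_nil] at this
    refine (this.cons 1).trans (by decide)
  · rw [h0] at h
    have p2 : ([y 0, y 1, y 2, y 3] : List α).Perm [y 2, y 0, y 1, y 3] :=
      ((List.Perm.swap (y 2) (y 1) [y 3]).cons (y 0)).trans (List.Perm.swap (y 2) (y 0) [y 1, y 3])
    have h' := (h.trans p2).cons_inv
    obtain ⟨τ, hτ, e1, e2, e3⟩ := perm3_exists x1 x2 x3 (fun n => y ([0, 1, 3].getD n 0)) (by simpa using h')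
    refine ⟨fun n => if n = 0 then 2 else [0, 1, 3].getD (τ (n - 1)) 0, ?_, h0, e1, e2, e3⟩
    have := hτ.map (fun n => ([0, 1, 3] : List Nat).getD n 0)
    simp only [List.map_cons, List.map_nil] at this
    refine (this.cons 2).trans (by decide)
  · rw [h0] at h
    have p2 : ([y 0, y 1, y 2, y 3] : List α).Perm [y 3, y 0, y 1, y 2] := by
      refine List.Perm.trans ?_ (List.Perm.swap (y 3) (y 0) [y 1, y 2])
      exact (((List.Perm.swap (y 3) (y 2) []).cons (y 1)).trans (List.Perm.swap (y 3) (y 1) [y 2])).cons (y 0)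
    have h' := (h.trans p2).cons_inv
    obtain ⟨τ, hτ, e1, e2, e3⟩ := perm3_exists x1 x2 x3 (fun n => y ([0, 1, 2].getD n 0)) (by simpa using h')
    refine ⟨fun n => if n = 0 then 3 else [0, 1, 2].getD (τ (n - 1)) 0, ?_, h0, e1, e2, e3⟩
    have := hτ.map (fun n => ([0, 1, 2] : List Nat).getD n 0)
    simp only [List.map_cons, List.map_nil] at this
    refine (this.cons 3).trans (by decide)

lemma inj4 {σ : Nat → Nat} (h : ([σ 0, σ 1, σ 2, σ 3] : List Nat).Perm [0, 1, 2, 3]) :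
    ∀ a b, a < 4 → b < 4 → σ a = σ b → a = b := by
  have hn : ([σ 0, σ 1, σ 2, σ 3] : List Nat).Nodup := h.nodup_iff.mpr (by decide)
  simp only [List.nodup_cons, List.mem_cons, List.not_mem_nil] at hn
  intro a b ha hb hab
  interval_cases a <;> interval_cases b <;> simp_all

-- partition of a pair list with suits < 4 into its four suit groups
lemma partition4 (t : List (Nat × Nat)) (ht : ∀ x ∈ t, x.2 < 4) :
    t.Perm ((t.filter (fun x => x.2 == 0)) ++ ((t.filter (fun x => x.2 == 1)) ++
      ((t.filter (fun x => x.2 == 2)) ++ (t.filter (fun x => x.2 == 3))))) := by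
  induction t with
  | nil => simp
  | cons x t ih =>
    have hx : x.2 < 4 := ht x (by simp)
    have iht := ih (fun y hy => ht y (List.mem_cons_of_mem _ hy))
    have h4 : x.2 = 0 ∨ x.2 = 1 ∨ x.2 = 2 ∨ x.2 = 3 := by omega
    rcases h4 with h | h | h | h <;>
      simp only [List.filter_cons, h] <;>
      simp only [beq_iff_eq, if_true, List.cons_append]
    · exact iht.cons x
    · exact (iht.cons x).trans (List.perm_middle (l₁ := t.filter (fun x => x.2 == 0))).symm
    · refine (iht.cons x).trans ?_
      refine List.Perm.trans (List.perm_middle (l₁ := t.filter (fun x => x.2 == 0))).symm ?_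
      exact List.Perm.append_left _ (List.perm_middle (l₁ := t.filter (fun x => x.2 == 1))).symm
    · refine (iht.cons x).trans ?_
      refine List.Perm.trans (List.perm_middle (l₁ := t.filter (fun x => x.2 == 0))).symm ?_
      refine List.Perm.append_left _ (List.Perm.trans (List.perm_middle (l₁ := t.filter (fun x => x.2 == 1))).symm ?_)
      exact List.Perm.append_left _ (List.perm_middle (l₁ := t.filter (fun x => x.2 == 2))).symm

lemma filter_eq_selG_map (i : Nat) (t : List (Nat × Nat)) :
    t.filter (fun x => x.2 == i) = (selG i t).map (fun r => (r, i)) := by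
  unfold selG
  rw [List.map_map]
  symm
  apply List.map_congr_left ?_ |>.trans (List.map_id _)
  intro x hx
  have := List.of_mem_filter hx
  simp only [beq_iff_eq] at this
  simp [Function.comp, ← this]

lemma selG_relab (σ : Nat → Nat) (t : List (Nat × Nat)) (ht : ∀ x ∈ t, x.2 < 4)
    (hinj : ∀ a b, a < 4 → b < 4 → σ a = σ b → a = b) (j : Nat) (hj : j < 4) :
    selG (σ j) (relab σ t) = selG j t := by
  unfold selG relab
  rw [List.filter_map, List.filter_congr (q := fun x => x.2 == j), List.map_map]
  · rfl
  · intro x hx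
    simp only [Function.comp]
    by_cases hc : x.2 = j
    · simp [hc]
    · have hd : σ x.2 ≠ σ j := fun he => hc (hinj _ _ (ht x hx) hj he)
      simp [hc, hd]

lemma canonList_relab_perm (σ : Nat → Nat)
    (hperm : ([σ 0, σ 1, σ 2, σ 3] : List Nat).Perm [0, 1, 2, 3])
    (t : List (Nat × Nat)) (ht : ∀ x ∈ t, x.2 < 4) :
    (canonList (relab σ t)).Perm (canonList t) := by
  have hinj := inj4 hperm
  have hsel : ∀ j, j < 4 → sortN (selG (σ j) (relab σ t)) = sortN (selG j t) := fun j hj => by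
    rw [selG_relab σ t ht hinj j hj]
  have hct : canonList t = List.map (fun i => sortN (selG i (relab σ t))) [σ 0, σ 1, σ 2, σ 3] := by
    simp only [List.map_cons, List.map_nil, canonList]
    rw [hsel 0 (by omega), hsel 1 (by omega), hsel 2 (by omega), hsel 3 (by omega)]
  have hcr : canonList (relab σ t) =
      List.map (fun i => sortN (selG i (relab σ t))) [0, 1, 2, 3] := by
    simp [canonList]
  rw [hcr, hct]
  exact (hperm.symm).map _

lemma canonList_eq_of_perm {t1 t2 : List (Nat × Nat)} (h : t1.Perm t2) :
    canonList t1 = canonList t2 := by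
  have : ∀ i, sortN (selG i t1) = sortN (selG i t2) := by
    intro i
    exact (PySem.List.sorted_id_eq_sorted_id_iff_perm _ _).mpr ((h.filter _).map _)
  simp [canonList, this]

-- the 24 suit maps: each induces a permutation of the base suit indices
lemma sigmaOf_mem_perm :
    ∀ m ∈ PySem.List.permutations pvDhcs 4,
      ([sigmaOf m 0, sigmaOf m 1, sigmaOf m 2, sigmaOf m 3] : List Nat).Perm [0, 1, 2, 3] := by
  decide

lemma pick_st (c : Char) (hc : c ∈ pvDhcs) : pvDhcs.getD (stF c) 'd' = c := by
  fin_cases hc <;> decide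

lemma st_lt (c : Char) (hc : c ∈ pvDhcs) : stF c < 4 := by
  fin_cases hc <;> decide

lemma raw_snd_lt (s : String) (hs : ValidBoard s) : ∀ x ∈ rawT s, x.2 < 4 := by
  intro x hx
  rcases List.mem_map.mp hx with ⟨p, hp, rfl⟩
  exact st_lt p.2 (hs p hp).2

lemma tokenize_dhcs (s : String) :
    tokenize pvDhcs s = PySem.List.sorted2 (rawT s) Prod.fst Prod.snd := rfl

lemma tokenize_m (m : List Char) (s : String) (hs : ValidBoard s) :
    tokenize m s = PySem.List.sorted2 (relab (sigmaOf m) (rawT s)) Prod.fst Prod.snd := by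
  have key : ((pvPairs s).map (fun rs => (pvIdx pvRanks rs.1, pvIdx m rs.2))) =
      relab (sigmaOf m) (rawT s) := by
    unfold relab rawT
    rw [List.map_map]
    apply List.map_congr_left
    intro p hp
    have h2 := (hs p hp).2
    simp only [Function.comp]
    show (pvIdx pvRanks p.1, pvIdx m p.2) = (rkF p.1, sigmaOf m (stF p.2))
    unfold sigmaOf rkF
    rw [pick_st p.2 h2]
  unfold tokenize
  rw [key]

-- existence of a suit map realising a given index permutation
lemma mk_m (a b c d : Nat) (h : ([a, b, c, d] : List Nat).Perm [0, 1, 2, 3]) :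
    [pvDhcs.getD a 'd', pvDhcs.getD b 'd', pvDhcs.getD c 'd', pvDhcs.getD d 'd'] ∈
        PySem.List.permutations pvDhcs 4 ∧
      sigmaOf [pvDhcs.getD a 'd', pvDhcs.getD b 'd', pvDhcs.getD c 'd', pvDhcs.getD d 'd'] a = 0 ∧
      sigmaOf [pvDhcs.getD a 'd', pvDhcs.getD b 'd', pvDhcs.getD c 'd', pvDhcs.getD d 'd'] b = 1 ∧
      sigmaOf [pvDhcs.getD a 'd', pvDhcs.getD b 'd', pvDhcs.getD c 'd', pvDhcs.getD d 'd'] c = 2 ∧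
      sigmaOf [pvDhcs.getD a 'd', pvDhcs.getD b 'd', pvDhcs.getD c 'd', pvDhcs.getD d 'd'] d = 3 := by
  have ha : a < 4 := by
    have := h.subset (List.mem_cons_self ..)
    simp at this; omega
  have hb : b < 4 := by
    have := h.subset (by simp : b ∈ [a,b,c,d])
    simp at this; omega
  have hc : c < 4 := by
    have := h.subset (by simp : c ∈ [a,b,c,d])
    simp at this; omega
  have hd : d < 4 := by
    have := h.subset (by simp : d ∈ [a,b,c,d])
    simp at this; omega
  interval_cases a <;> interval_cases b <;> interval_cases c <;> interval_cases d <;>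
    revert h <;> decide

-- B's group-building fold
lemma foldGroups (t : List (Nat × Nat)) (ht : ∀ x ∈ t, x.2 < 4) :
    ∀ (a b c d : List Nat),
      t.foldl (fun (g : List (List Nat)) x => g.set x.2 ((g.getD x.2 []) ++ [x.1])) [a, b, c, d] =
        [a ++ selG 0 t, b ++ selG 1 t, c ++ selG 2 t, d ++ selG 3 t] := by
  induction t with
  | nil => simp [selG]
  | cons x t ih =>
    intro a b c d
    have hx : x.2 < 4 := ht x (by simp)
    have iht := ih (fun y hy => ht y (List.mem_cons_of_mem _ hy))
    have h4 : x.2 = 0 ∨ x.2 = 1 ∨ x.2 = 2 ∨ x.2 = 3 := by omega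
    rcases h4 with h | h | h | h
    · rw [List.foldl_cons, show (([a,b,c,d] : List (List Nat)).set x.2 (([a,b,c,d] : List (List Nat)).getD x.2 [] ++ [x.1])) = [a ++ [x.1], b, c, d] from by simp [h, List.getD], iht]
      simp [selG, h, List.append_assoc]
    · rw [List.foldl_cons, show (([a,b,c,d] : List (List Nat)).set x.2 (([a,b,c,d] : List (List Nat)).getD x.2 [] ++ [x.1])) = [a, b ++ [x.1], c, d] from by simp [h, List.getD], iht]
      simp [selG, h, List.append_assoc]
    · rw [List.foldl_cons, show (([a,b,c,d] : List (List Nat)).set x.2 (([a,b,c,d] : List (List Nat)).getD x.2 [] ++ [x.1])) = [a, b, c ++ [x.1], d] from by simp [h, List.getD], iht]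
      simp [selG, h, List.append_assoc]
    · rw [List.foldl_cons, show (([a,b,c,d] : List (List Nat)).set x.2 (([a,b,c,d] : List (List Nat)).getD x.2 [] ++ [x.1])) = [a, b, c, d ++ [x.1]] from by simp [h, List.getD], iht]
      simp [selG, h, List.append_assoc]

lemma pvCanon_eq (s : String) (hs : ValidBoard s) :
    pvCanon s = PySem.List.sorted (canonList (rawT s)) (fun x => x) := by
  have hfold : (pvPairs s).foldl
      (fun (g : List (List Nat)) rs =>
        g.set (pvIdx ['d', 'h', 'c', 's'] rs.2)
          ((g.getD (pvIdx ['d', 'h', 'c', 's'] rs.2) []) ++ [pvIdx pvRanks rs.1]))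
      [[], [], [], []] =
      [selG 0 (rawT s), selG 1 (rawT s), selG 2 (rawT s), selG 3 (rawT s)] := by
    have hfg := foldGroups (rawT s) (raw_snd_lt s hs) [] [] [] []
    simp only [List.nil_append] at hfg
    rw [← hfg]
    unfold rawT
    rw [List.foldl_map]
    rfl
  simp only [pvCanon]
  rw [hfold]
  rfl

lemma sortedLL_bridge (xs : List (List Nat)) :
    PySem.List.sorted xs (fun x => x) =
      @PySem.List.sorted (List Nat) (List Nat) List.instLinearOrder.toLT
        LinearOrder.toDecidableLT xs (fun x => x) false := by
  simp only [PySem.List.sorted]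
  congr 1
  funext acc x
  congr 1
  funext a b
  exact decide_eq_decide.mpr (List.lt_iff_lex_lt a b)

lemma sortedLL_eq_iff_perm (xs ys : List (List Nat)) :
    (PySem.List.sorted xs (fun x => x) = PySem.List.sorted ys (fun x => x)) ↔ xs.Perm ys := by
  rw [sortedLL_bridge xs, sortedLL_bridge ys]
  exact PySem.List.sorted_id_eq_sorted_id_iff_perm xs ys

lemma core_iff (s1 s2 : String) (h1 : ValidBoard s1) (h2 : ValidBoard s2) :
    ((PySem.List.permutations pvDhcs 4).any
        (fun m => tokenize m s2 == tokenize pvDhcs s1)) = true ↔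
      (pvCanon s1 == pvCanon s2) = true := by
  rw [List.any_eq_true]
  rw [beq_iff_eq]
  rw [pvCanon_eq s1 h1]
  rw [pvCanon_eq s2 h2]
  rw [sortedLL_eq_iff_perm]
  constructor
  · rintro ⟨m, hm, he⟩
    rw [beq_iff_eq, tokenize_m m s2 h2, tokenize_dhcs, sorted2_eq_iff_perm] at he
    have c1 : canonList (rawT s1) = canonList (relab (sigmaOf m) (rawT s2)) :=
      (canonList_eq_of_perm he).symm
    have c2 := canonList_relab_perm (sigmaOf m) (sigmaOf_mem_perm m hm) (rawT s2)
      (raw_snd_lt s2 h2)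
    rw [c1]
    exact c2
  · intro hB
    obtain ⟨σ, hσp, e0, e1, e2, e3⟩ :=
      perm4_exists _ _ _ _ (fun j => sortN (selG j (rawT s2))) hB
    obtain ⟨hmem, s0, s1', s2', s3'⟩ := mk_m (σ 0) (σ 1) (σ 2) (σ 3) hσp
    refine ⟨_, hmem, ?_⟩
    rw [beq_iff_eq, tokenize_m _ s2 h2, tokenize_dhcs, sorted2_eq_iff_perm]
    set σm := sigmaOf [pvDhcs.getD (σ 0) 'd', pvDhcs.getD (σ 1) 'd',
      pvDhcs.getD (σ 2) 'd', pvDhcs.getD (σ 3) 'd'] with hσm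
    -- group-by-group permutations between the two boards
    have gsel : ∀ i, sortN (selG i (rawT s1)) = sortN (selG (σ i) (rawT s2)) →
        ((selG (σ i) (rawT s2)).Perm (selG i (rawT s1))) := fun i hi =>
      ((PySem.List.sorted_id_eq_sorted_id_iff_perm _ _).mp hi).symm
    have g0 := gsel 0 e0
    have g1 := gsel 1 e1
    have g2 := gsel 2 e2
    have g3 := gsel 3 e3
    -- partition both token lists into suit blocks
    have hp1 := partition4 (rawT s1) (raw_snd_lt s1 h1)
    have hp2 := partition4 (rawT s2) (raw_snd_lt s2 h2)
    -- relabelled blocks of board 2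
    have hmap := hp2.map (fun x => (x.1, σm x.2))
    have hblocks : (relab σm (rawT s2)).Perm
        (List.map (fun j => (selG j (rawT s2)).map (fun r => (r, σm j))) [0, 1, 2, 3]).flatten := by
      refine hmap.trans ?_
      simp only [List.map_append, filter_eq_selG_map, List.map_map, List.map_cons,
        List.map_nil, List.flatten_cons, List.flatten_nil, List.append_nil]
      exact List.Perm.refl _
    have hflat : ((List.map (fun j => (selG j (rawT s2)).map (fun r => (r, σm j)))
          [0, 1, 2, 3]).flatten).Perm
        ((List.map (fun j => (selG j (rawT s2)).map (fun r => (r, σm j)))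
          [σ 0, σ 1, σ 2, σ 3]).flatten) :=
      (hσp.symm.map _).flatten
    -- each reordered block matches a block of board 1
    have hfin : ((List.map (fun j => (selG j (rawT s2)).map (fun r => (r, σm j)))
          [σ 0, σ 1, σ 2, σ 3]).flatten).Perm (rawT s1) := by
      simp only [List.map_cons, List.map_nil, List.flatten_cons, List.flatten_nil,
        List.append_nil, s0, s1', s2', s3']
      refine List.Perm.trans ?_ hp1.symm
      simp only [filter_eq_selG_map]
      exact ((g0.map _).append ((g1.map _).append ((g2.map _).append (g3.map _))))
    exact (hblocks.trans (hflat.trans hfin))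

-- ===== VERDICT (by name: the statement is the Claim_ definition above) =====
theorem boards_isomorphic_spec : Claim_equal_boards_isomorphic := by
  intro s1 s2 _hdom hpre
  unfold Spec_boards_isomorphic
  rw [Bool.eq_iff_iff]
  exact core_iff s1 s2 hpre.1 hpre.2
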